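-- pv_equiv track=rewrite | github.com/Divij002/Machine-Learning-Course | 6. Face Recognition Project/Challenge_snap_filter.py | pick_best_nose
-- ===== SOURCE A (Python) =====
-- def pick_best_nose(noses, eye_line_y=None):
--     """
--     Prefer noses below the eye line (if given); otherwise choose largest area.
--     """
--     if noses is None or len(noses) == 0:
--         return None
--
--     candidates = [b for b in noses if eye_line_y is None or b[1] > eye_line_y]
--     if not candidates:
--         candidates = list(noses)
--
--     nx, ny, nw, nh = max(candidates, key=lambda b: b[2] * b[3])
--     return int(nx), int(ny), int(nw), int(nh)
-- ===== SOURCE B (Python) =====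
-- def pick_best_nose(noses, eye_line_y=None):
--     """One linear pass keeping two running candidates instead of filter+max."""
--     if noses is None:
--         return None
--     best_overall = None
--     best_below = None
--     for b in noses:
--         if best_overall is None or b[2] * b[3] > best_overall[2] * best_overall[3]:
--             best_overall = b
--         if (eye_line_y is None or b[1] > eye_line_y) and \
--            (best_below is None or b[2] * b[3] > best_below[2] * best_below[3]):
--             best_below = b
--     best = best_below if best_below is not None else best_overall
--     if best is None:
--         return None
--     return int(best[0]), int(best[1]), int(best[2]), int(best[3])
-- ===== Notes on version B (the rewrite author's own statement) =====
-- stated objective: alternative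
-- what changed: Replaced the filter-then-max(list) decomposition by a single loop over noses that maintains two running candidates (best overall area, best area among boxes below the eye line) with strict-> updates, returning the below-line candidate when one exists.
import Mathlib
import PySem

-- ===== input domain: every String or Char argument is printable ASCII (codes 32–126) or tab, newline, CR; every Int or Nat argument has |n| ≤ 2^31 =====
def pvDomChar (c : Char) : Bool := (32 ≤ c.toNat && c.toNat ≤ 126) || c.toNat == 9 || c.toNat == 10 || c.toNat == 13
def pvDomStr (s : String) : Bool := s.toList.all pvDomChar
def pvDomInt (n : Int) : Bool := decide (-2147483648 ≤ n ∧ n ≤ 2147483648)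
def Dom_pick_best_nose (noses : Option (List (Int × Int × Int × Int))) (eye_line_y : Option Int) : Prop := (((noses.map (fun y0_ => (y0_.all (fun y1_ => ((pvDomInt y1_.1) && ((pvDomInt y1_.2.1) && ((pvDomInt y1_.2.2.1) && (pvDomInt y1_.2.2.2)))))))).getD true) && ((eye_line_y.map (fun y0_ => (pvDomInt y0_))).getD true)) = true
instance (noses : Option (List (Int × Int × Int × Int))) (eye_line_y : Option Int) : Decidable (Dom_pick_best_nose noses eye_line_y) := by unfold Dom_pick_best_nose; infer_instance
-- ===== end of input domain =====

-- ===== PORT A =====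
-- B replaces A's filter+max decomposition by a single pass with two running candidates (same O(n) cost, no intermediate list).
def pick_best_nose (noses : Option (List (Int × Int × Int × Int))) (eye_line_y : Option Int) : Option (Int × Int × Int × Int) :=
  match noses with
  | none => none
  | some ns =>
    if ns.length = 0 then none
    else
      let candidates := ns.filter (fun b => match eye_line_y with | none => true | some y => decide (y < b.2.1))
      let candidates := if candidates.isEmpty then ns else candidates
      match PySem.List.max? candidates (fun b => b.2.2.1 * b.2.2.2) with
      | some (nx, ny, nw, nh) => some (nx, ny, nw, nh)
      | none => none

-- ===== PORT B =====
def pvUpd (best : Option (Int × Int × Int × Int)) (b : Int × Int × Int × Int) : Option (Int × Int × Int × Int) :=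
  match best with
  | none => some b
  | some m => if m.2.2.1 * m.2.2.2 < b.2.2.1 * b.2.2.2 then some b else some m

def pvBelow (eye_line_y : Option Int) (b : Int × Int × Int × Int) : Bool :=
  match eye_line_y with | none => true | some y => decide (y < b.2.1)

def pick_best_nose_alt (noses : Option (List (Int × Int × Int × Int))) (eye_line_y : Option Int) : Option (Int × Int × Int × Int) :=
  match noses with
  | none => none
  | some ns =>
    let p := ns.foldl
      (fun (acc : Option (Int × Int × Int × Int) × Option (Int × Int × Int × Int)) b =>
        (pvUpd acc.1 b, if pvBelow eye_line_y b then pvUpd acc.2 b else acc.2))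
      (none, none)
    match (match p.2 with | some m => some m | none => p.1) with
    | none => none
    | some (nx, ny, nw, nh) => some (nx, ny, nw, nh)

-- ===== PRECONDITION & SPEC =====
def Spec_pick_best_nose (noses : Option (List (Int × Int × Int × Int))) (eye_line_y : Option Int) (out : Option (Int × Int × Int × Int)) : Prop := out = pick_best_nose_alt noses eye_line_y
instance (noses : Option (List (Int × Int × Int × Int))) (eye_line_y : Option Int) (out : Option (Int × Int × Int × Int)) : Decidable (Spec_pick_best_nose noses eye_line_y out) := by unfold Spec_pick_best_nose; infer_instance

-- ===== CLAIM (what is proved, stated in full; the proofs are below) =====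
def Claim_equal_pick_best_nose : Prop := ∀ (noses : Option (List (Int × Int × Int × Int))) (eye_line_y : Option Int), Dom_pick_best_nose noses eye_line_y → Spec_pick_best_nose noses eye_line_y (pick_best_nose noses eye_line_y)

-- ===== LEMMAS AND PROOFS =====

-- The paired fold of B computes the max?-folds of the whole list and of the filtered list.
theorem pvPair_fold (ey : Option Int) (ns : List (Int × Int × Int × Int))
    (o b : Option (Int × Int × Int × Int)) :
    ns.foldl
      (fun (acc : Option (Int × Int × Int × Int) × Option (Int × Int × Int × Int)) x =>
        (pvUpd acc.1 x, if pvBelow ey x then pvUpd acc.2 x else acc.2)) (o, b)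
    = (ns.foldl pvUpd o, (ns.filter (pvBelow ey)).foldl pvUpd b) := by
  induction ns generalizing o b with
  | nil => rfl
  | cons x t ih =>
    simp only [List.foldl_cons, List.filter_cons]
    by_cases h : pvBelow ey x
    · simp [h, ih]
    · simp [h, ih]

-- max? is exactly the pvUpd fold starting from none.
theorem max?_eq_fold (ns : List (Int × Int × Int × Int)) :
    PySem.List.max? ns (fun b => b.2.2.1 * b.2.2.2) = ns.foldl pvUpd none := by
  unfold PySem.List.max?
  congr 1
  funext acc x
  cases acc <;> rfl

theorem fold_ne_none (ns : List (Int × Int × Int × Int)) (m : Int × Int × Int × Int) :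
    ns.foldl pvUpd (some m) ≠ none := by
  induction ns generalizing m with
  | nil => simp
  | cons x t ih =>
    simp only [List.foldl_cons, pvUpd]
    split <;> exact ih _

-- ===== VERDICT (by name: the statement is the Claim_ definition above) =====
theorem pick_best_nose_spec : Claim_equal_pick_best_nose := by
  intro noses ey _
  unfold Spec_pick_best_nose pick_best_nose pick_best_nose_alt
  cases noses with
  | none => rfl
  | some ns =>
    simp only [pvPair_fold]
    have hfilt : ns.filter (fun b => match ey with | none => true | some y => decide (y < b.2.1))
        = ns.filter (pvBelow ey) := by
      rfl
    cases ns with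
    | nil => rfl
    | cons x t =>
      simp only [List.length_cons, hfilt, max?_eq_fold]
      rw [if_neg (by omega)]
      have hx : pvUpd none x = some x := rfl
      rcases hf : (x :: t).filter (pvBelow ey) with _ | ⟨y, ys⟩
      · rcases hv : t.foldl pvUpd (some x) with _ | ⟨a, b, c, d⟩
        · exact absurd hv (fold_ne_none t x)
        · simp [hx, hv]
      · have hy : pvUpd none y = some y := rfl
        rcases hv : ys.foldl pvUpd (some y) with _ | ⟨a, b, c, d⟩
        · exact absurd hv (fold_ne_none ys y)
        · simp [hy, hv, List.foldl_cons]
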